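-- pv_equiv track=rewrite | github.com/AblazeVase69188/mcw-snapshot-tools | main.py | get_version_type
-- ===== SOURCE A (Python) =====
-- def get_version_type(version_name):  # 返回版本类型
--     v1_year = ["11", "12", "13", "14", "15", "16", "17", "18", "19", "20", "21", "22", "23", "24", "25"]
--     v2_year = ["26", "27", "28", "29", "30", "31", "32", "33", "34", "35"]
--     v2_num = ["1", "2", "3", "4"]
--
--     if "-snapshot-" in version_name:
--         return "Snapshot"
--     elif "-pre-" in version_name:
--         return "Pre-release"
--     elif "-rc-" in version_name:
--         return "Release Candidate"
--     if version_name in {f"{y}.{n}" for y in v2_year for n in v2_num}: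
--         return "Release"
--
--     return "N/A"
-- ===== SOURCE B (Python) =====
-- def get_version_type(version_name):
--     for marker, label in (("-snapshot-", "Snapshot"),
--                           ("-pre-", "Pre-release"),
--                           ("-rc-", "Release Candidate")):
--         if marker in version_name:
--             return label
--     v = version_name
--     if (len(v) == 4 and v[2] == '.'
--             and v[0].isdigit() and v[1].isdigit()
--             and 26 <= 10 * int(v[0]) + int(v[1]) <= 35
--             and v[3] in "1234"):
--         return "Release"
--     return "N/A"
-- ===== Notes on version B (the rewrite author's own statement) =====
-- stated objective: simpler
-- what changed: B replaces A's membership test in a generated 40-element product set {y.n} by a direct positional parse of the string (length 4, digit-digit-dot-digit with the two-digit year in 26..35 and the last char in '1'..'4'), and folds the three substring branches into one marker table loop.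
import Mathlib
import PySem

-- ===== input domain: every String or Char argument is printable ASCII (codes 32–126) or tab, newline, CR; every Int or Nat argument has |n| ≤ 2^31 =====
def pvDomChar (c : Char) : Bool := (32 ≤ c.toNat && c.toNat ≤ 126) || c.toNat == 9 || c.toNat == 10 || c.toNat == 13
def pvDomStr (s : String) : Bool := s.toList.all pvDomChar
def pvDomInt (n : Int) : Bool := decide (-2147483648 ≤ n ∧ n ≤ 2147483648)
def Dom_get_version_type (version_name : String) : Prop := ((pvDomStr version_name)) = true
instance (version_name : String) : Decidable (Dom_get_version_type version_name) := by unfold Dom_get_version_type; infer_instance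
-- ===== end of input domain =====

-- B replaces A's 40-element product-set membership test by a direct positional parse
-- (length-4, digits, numeric year range, priority char) — objective: simpler.


-- ===== PORT A =====
def get_version_type (version_name : String) : String :=
  let _v1_year : List String := ["11", "12", "13", "14", "15", "16", "17", "18", "19", "20", "21", "22", "23", "24", "25"]
  let v2_year : List String := ["26", "27", "28", "29", "30", "31", "32", "33", "34", "35"]
  let v2_num : List String := ["1", "2", "3", "4"]
  if PySem.Str.isIn "-snapshot-" version_name then "Snapshot"
  else if PySem.Str.isIn "-pre-" version_name then "Pre-release"
  else if PySem.Str.isIn "-rc-" version_name then "Release Candidate"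
  else if PySem.Set.contains
      -- f"{y}.{n}" ported as PySem.Str.join "" [y, ".", n] (exact string concatenation)
      (PySem.Set.ofList (v2_year.flatMap (fun y => v2_num.map (fun n => PySem.Str.join "" [y, ".", n]))))
      version_name then "Release"
  else "N/A"

-- ===== PORT B =====
-- len(v) == 4 plus v[0],v[1],v[2],v[3] ported as the four-element match on toList;
-- int(v[i]) on a char known to satisfy isdigit ported as toNat - 48 (exact on ASCII digits);
-- v[3] in "1234" ported as the four-way char comparison.
def pvReleaseCheck (v : String) : Bool :=
  match v.toList with
  | [a, b, c, d] =>
      c == '.' && a.isDigit && b.isDigit &&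
      decide (26 ≤ 10 * (a.toNat - 48) + (b.toNat - 48)) &&
      decide (10 * (a.toNat - 48) + (b.toNat - 48) ≤ 35) &&
      (d == '1' || d == '2' || d == '3' || d == '4')
  | _ => false

def get_version_type_alt (version_name : String) : String :=
  match [("-snapshot-", "Snapshot"), ("-pre-", "Pre-release"), ("-rc-", "Release Candidate")].find?
      (fun ml => PySem.Str.isIn ml.1 version_name) with
  | some ml => ml.2
  | none => if pvReleaseCheck version_name then "Release" else "N/A"

-- ===== PRECONDITION & SPEC =====
def Spec_get_version_type (version_name : String) (out : String) : Prop := out = get_version_type_alt version_name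
instance (version_name : String) (out : String) : Decidable (Spec_get_version_type version_name out) := by unfold Spec_get_version_type; infer_instance

-- ===== CLAIM (what is proved, stated in full; the proofs are below) =====
def Claim_equal_get_version_type : Prop := ∀ (version_name : String), Dom_get_version_type version_name → Spec_get_version_type version_name (get_version_type version_name)

-- ===== LEMMAS AND PROOFS =====

-- the 40 release strings, evaluated
def pvRelList : List String :=
  ["26.1","26.2","26.3","26.4","27.1","27.2","27.3","27.4","28.1","28.2","28.3","28.4",
   "29.1","29.2","29.3","29.4","30.1","30.2","30.3","30.4","31.1","31.2","31.3","31.4",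
   "32.1","32.2","32.3","32.4","33.1","33.2","33.3","33.4","34.1","34.2","34.3","34.4",
   "35.1","35.2","35.3","35.4"]

theorem pvSet_eval :
    (["26","27","28","29","30","31","32","33","34","35"].flatMap
      (fun y => ["1","2","3","4"].map (fun n => PySem.Str.join "" [y, ".", n]))) = pvRelList := by
  decide

theorem pvLen4 : ∀ t ∈ pvRelList, t.toList.length = 4 := by decide

theorem pvNotMem_of_len (cs : List Char) (h : cs.length ≠ 4) :
    PySem.Set.contains (PySem.Set.ofList pvRelList) (String.ofList cs) = false := by
  rw [Bool.eq_false_iff]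
  intro hc
  have hm := (PySem.Set.mem_ofList _ _).mp ((PySem.Set.contains_iff _ _).mp hc)
  have hl := pvLen4 _ hm
  simp at hl
  exact h hl

theorem pvContains_eq_check (s : String) :
    PySem.Set.contains (PySem.Set.ofList pvRelList) s = pvReleaseCheck s := by
  obtain ⟨cs, rfl⟩ : ∃ cs, s = String.ofList cs := ⟨s.toList, String.ofList_toList.symm⟩
  rcases cs with _ | ⟨a, _ | ⟨b, _ | ⟨c, _ | ⟨d, _ | ⟨e, tl⟩⟩⟩⟩⟩
  · rw [pvNotMem_of_len _ (by simp)]; simp [pvReleaseCheck]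
  · rw [pvNotMem_of_len _ (by simp)]; simp [pvReleaseCheck]
  · rw [pvNotMem_of_len _ (by simp)]; simp [pvReleaseCheck]
  · rw [pvNotMem_of_len _ (by simp)]; simp [pvReleaseCheck]
  case cons.cons.cons.cons.cons => rw [pvNotMem_of_len _ (by simp)]; simp [pvReleaseCheck]
  rw [Bool.eq_iff_iff, PySem.Set.contains_iff, PySem.Set.mem_ofList]
  constructor
  · intro h
    simp only [pvRelList, List.mem_cons, List.not_mem_nil, or_false] at h
    rcases h with h|h|h|h|h|h|h|h|h|h|h|h|h|h|h|h|h|h|h|h|h|h|h|h|h|h|h|h|h|h|h|h|h|h|h|h|h|h|h|h <;>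
      · obtain ⟨rfl, rfl, rfl, rfl⟩ := by simpa using congrArg String.toList h
        decide
  · intro h
    simp [pvReleaseCheck, Char.isDigit] at h
    obtain ⟨⟨⟨⟨⟨hc, ha1, ha2⟩, hb1, hb2⟩, h1⟩, h2⟩, hd⟩ := h
    subst hc
    have hA1 : 48 ≤ a.toNat := ha1
    have hA2 : a.toNat ≤ 57 := ha2
    have hB1 : 48 ≤ b.toNat := hb1
    have hB2 : b.toNat ≤ 57 := hb2
    have hax : a.toNat = 50 ∨ a.toNat = 51 := by omega
    have hbx : b.toNat = 48 ∨ b.toNat = 49 ∨ b.toNat = 50 ∨ b.toNat = 51 ∨ b.toNat = 52 ∨ b.toNat = 53 ∨ b.toNat = 54 ∨ b.toNat = 55 ∨ b.toNat = 56 ∨ b.toNat = 57 := by omega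
    rcases hd with ((rfl | rfl) | rfl) | rfl <;> rcases hax with ha' | ha' <;>
        rcases hbx with hb'|hb'|hb'|hb'|hb'|hb'|hb'|hb'|hb'|hb' <;>
      first
        | omega
        | (rw [(Char.ofNat_toNat a).symm.trans (congrArg Char.ofNat ha'),
               (Char.ofNat_toNat b).symm.trans (congrArg Char.ofNat hb')]
           decide)

theorem get_version_type_spec_aux (s : String) : get_version_type s = get_version_type_alt s := by
  simp only [get_version_type, get_version_type_alt]
  rw [pvSet_eval, pvContains_eq_check s]
  by_cases h1 : PySem.Str.isIn "-snapshot-" s = true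
  · rw [if_pos h1, List.find?_cons_of_pos (by simpa using h1)]
  · rw [if_neg h1, List.find?_cons_of_neg (by simpa using h1)]
    by_cases h2 : PySem.Str.isIn "-pre-" s = true
    · rw [if_pos h2, List.find?_cons_of_pos (by simpa using h2)]
    · rw [if_neg h2, List.find?_cons_of_neg (by simpa using h2)]
      by_cases h3 : PySem.Str.isIn "-rc-" s = true
      · rw [if_pos h3, List.find?_cons_of_pos (by simpa using h3)]
      · rw [if_neg h3, List.find?_cons_of_neg (by simpa using h3), List.find?_nil]

-- ===== VERDICT (by name: the statement is the Claim_ definition above) =====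
theorem get_version_type_spec : Claim_equal_get_version_type := by
  intro s _
  unfold Spec_get_version_type
  exact get_version_type_spec_aux s
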